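-- pv_equiv track=rewrite | github.com/Dudly01/pkmn | core/scripts/evo_chains.py | merge_unown_lines
-- ===== SOURCE A (Python) =====
-- def merge_unown_lines(csv_rows: list[list[str]]) -> list[list[str]]:
--     """Merges the Unown lines, if present, to the expected form.
--
--     The Unown family lists the alphabet forms in the three columns.
--     This is unique to this Pokemon, and needs to be cleaned up.
--     Works with rows containing either 6 or 8 columns.
--     Works with raw and clean rows.
--     """
--
--     # Find range of lines for Unown
--     begin = next((i for i, r in enumerate(csv_rows) if r[0].strip() == "Unown"), None)
--     if begin is None:
--         return csv_rows
--
--     end = next(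
--         (
--             i
--             for i, r in enumerate(csv_rows[begin + 1 :], start=begin + 1)
--             if r[0].strip() != ""
--         ),
--         len(csv_rows),
--     )
--
--     # Create expected Unown lines
--     column_count = len(csv_rows[begin])
--     new_rows = [
--         ["" for _ in range(column_count)],
--         ["" for _ in range(column_count)],
--     ]
--     new_rows[0][0] = "Unown family"
--     new_rows[1][1] = "Unown"
--
--     merged_rows = csv_rows[:begin] + new_rows + csv_rows[end:]
--     return merged_rows
-- ===== SOURCE B (Python) =====
-- def merge_unown_lines(csv_rows: list[list[str]]) -> list[list[str]]:
--     """Merges the Unown lines, if present, to the expected form (single pass)."""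
--     out = []
--     done = False
--     skipping = False
--     for row in csv_rows:
--         if skipping:
--             if row[0].strip() != "":
--                 out.append(row)
--                 skipping = False
--             continue
--         if not done and row[0].strip() == "Unown":
--             n = len(row)
--             r0 = [""] * n
--             r0[0] = "Unown family"
--             r1 = [""] * n
--             r1[1] = "Unown"
--             out.append(r0)
--             out.append(r1)
--             done = True
--             skipping = True
--             continue
--         out.append(row)
--     if not done:
--         return csv_rows
--     return out
-- ===== Notes on version B (the rewrite author's own statement) =====
-- stated objective: alternative
-- what changed: Replaces the two index-searching generator passes plus slicing with one pass over the rows using done/skipping flags that emits the two canonical rows and drops the blank-first-column block in-line.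
import Mathlib
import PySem

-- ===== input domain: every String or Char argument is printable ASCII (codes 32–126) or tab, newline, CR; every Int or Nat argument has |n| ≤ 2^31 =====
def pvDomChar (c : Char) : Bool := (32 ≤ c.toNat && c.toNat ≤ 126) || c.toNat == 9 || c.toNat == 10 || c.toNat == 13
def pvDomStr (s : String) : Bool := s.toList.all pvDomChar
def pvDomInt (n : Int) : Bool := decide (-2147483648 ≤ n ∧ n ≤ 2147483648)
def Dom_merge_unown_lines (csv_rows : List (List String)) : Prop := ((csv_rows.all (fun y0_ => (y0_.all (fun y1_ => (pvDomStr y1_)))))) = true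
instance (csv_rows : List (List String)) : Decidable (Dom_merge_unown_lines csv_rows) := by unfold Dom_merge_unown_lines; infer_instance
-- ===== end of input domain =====

-- B replaces A's two index-finding scans + slice concatenation by one pass with done/skipping flags; return value (not mutation) equivalence; objective: alternative decomposition.

-- ===== PORT A =====
-- r[0].strip() ported via pyGet?; the `.getD ""` default is reached only on empty rows the
-- generators index, which Pre_ excludes (Python raises IndexError there).
def pvStripHead (r : List String) : String := PySem.Str.strip ((PySem.List.pyGet? r 0).getD "")

-- the two canonical rows built from the Unown row's width (`[""]*n` then item assignment; List.set is a no-op out of range, Python raises there — excluded by Pre_)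
def pvNewRows (n : Nat) : List (List String) :=
  [(List.replicate n "").set 0 "Unown family", (List.replicate n "").set 1 "Unown"]

def merge_unown_lines (csv_rows : List (List String)) : List (List String) :=
  match csv_rows.findIdx? (fun r => pvStripHead r == "Unown") with
  | none => csv_rows
  | some b =>
    let e : Nat :=
      match (csv_rows.drop (b + 1)).findIdx? (fun r => pvStripHead r != "") with
      | none => csv_rows.length
      | some j => b + 1 + j
    let column_count := ((csv_rows.drop b).headD []).length
    csv_rows.take b ++ pvNewRows column_count ++ csv_rows.drop e

-- ===== PORT B =====
-- row[0].strip() in Source B; the `.getD ""` default is reached only on empty rows B indexes (outside Pre_)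
def pvAltHead (r : List String) : String := PySem.Str.strip ((PySem.List.pyGet? r 0).getD "")

-- one pass with done/skipping flags; returns (emitted rows, final done flag)
def pvAltGo : List (List String) → Bool → Bool → (List (List String)) × Bool
  | [], done, _ => ([], done)
  | row :: rest, done, skipping =>
    if skipping then
      if pvAltHead row != "" then
        let p := pvAltGo rest done false
        (row :: p.1, p.2)
      else
        pvAltGo rest done true
    else if !done && (pvAltHead row == "Unown") then
      let p := pvAltGo rest true true
      ((List.replicate row.length "").set 0 "Unown family"
        :: (List.replicate row.length "").set 1 "Unown" :: p.1, p.2)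
    else
      let p := pvAltGo rest done skipping
      (row :: p.1, p.2)

def merge_unown_lines_alt (csv_rows : List (List String)) : List (List String) :=
  let p := pvAltGo csv_rows false false
  if p.2 then p.1 else csv_rows

-- ===== PRECONDITION & SPEC =====
-- Pre_ excludes exactly the inputs on which Python A raises IndexError: an empty row at a
-- position the generators index r[0] (up to and including the first 'Unown' row — or anywhere
-- when there is none — and, after it, the blank-first-column run up to and including the first
-- row with a non-blank first column), and a first 'Unown' row with fewer than two columns
-- (the new_rows[1][1] assignment). Empty rows past the scanned region are admitted.
def Pre_merge_unown_lines (csv_rows : List (List String)) : Prop :=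
  let b := ((csv_rows.findIdx? (fun r => pvStripHead r == "Unown")).getD csv_rows.length)
  (∀ r ∈ csv_rows.take (b + 1), r ≠ []) ∧
  ((csv_rows.findIdx? (fun r => pvStripHead r == "Unown")).isSome →
    2 ≤ ((csv_rows.drop b).headD []).length ∧
    (∀ r ∈ (csv_rows.drop (b + 1)).take
        (((csv_rows.drop (b + 1)).findIdx? (fun r => pvStripHead r != "")).getD
          (csv_rows.drop (b + 1)).length + 1),
      r ≠ []))

instance (csv_rows : List (List String)) : Decidable (Pre_merge_unown_lines csv_rows) := by
  unfold Pre_merge_unown_lines; infer_instance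

def pvWitness_merge_unown_lines : List (List String) :=
  [["Pichu", "x"], ["Unown", "A B C"], [" ", "D E"], ["Pidgey", "y"], []]

def Spec_merge_unown_lines (csv_rows : List (List String)) (out : List (List String)) : Prop := out = merge_unown_lines_alt csv_rows
instance (csv_rows : List (List String)) (out : List (List String)) : Decidable (Spec_merge_unown_lines csv_rows out) := by unfold Spec_merge_unown_lines; infer_instance

-- ===== CLAIM (what is proved, stated in full; the proofs are below) =====
def Claim_equal_merge_unown_lines : Prop := ∀ (csv_rows : List (List String)), Dom_merge_unown_lines csv_rows → Pre_merge_unown_lines csv_rows → Spec_merge_unown_lines csv_rows (merge_unown_lines csv_rows)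

-- ===== LEMMAS AND PROOFS =====

theorem pvAltHead_eq (r : List String) : pvAltHead r = pvStripHead r := rfl

-- once done and not skipping, B copies the tail verbatim
theorem pvAltGo_done (l : List (List String)) : pvAltGo l true false = (l, true) := by
  induction l with
  | nil => rfl
  | cons r t ih => simp [pvAltGo, ih]

-- skipping phase = dropWhile blank-first-column, then the rest verbatim
theorem pvAltGo_skip (l : List (List String)) :
    pvAltGo l true true = (l.dropWhile (fun r => !(pvStripHead r != "")), true) := by
  induction l with
  | nil => rfl
  | cons r t ih =>
    by_cases h : (pvStripHead r != "") = true
    · simp [pvAltGo, h, pvAltGo_done, List.dropWhile_cons, pvAltHead_eq]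
    · simp at h
      simp [pvAltGo, h, ih, List.dropWhile_cons, pvAltHead_eq]

-- drop at the first index satisfying p (default: length) = dropWhile (!p)
theorem drop_findIdx? (p : List String → Bool) (l : List (List String)) :
    l.drop ((l.findIdx? p).getD l.length) = l.dropWhile (fun r => !(p r)) := by
  induction l with
  | nil => rfl
  | cons r t ih =>
    by_cases h : p r = true
    · simp [List.findIdx?_cons, h, List.dropWhile_cons]
    · simp only [Bool.not_eq_true] at h
      simp only [List.findIdx?_cons, h, Bool.false_eq_true, if_false, List.dropWhile_cons,
        Bool.not_false, if_true]
      cases ht : t.findIdx? p with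
      | none => simpa [ht] using ih
      | some j => simpa [ht] using ih

-- B's final done flag is true iff an Unown row exists
theorem pvAltGo_done_iff (t : List (List String)) :
    (pvAltGo t false false).2 = (t.findIdx? (fun r => pvStripHead r == "Unown")).isSome := by
  induction t with
  | nil => rfl
  | cons s u ihu =>
    by_cases hs : (pvStripHead s == "Unown") = true
    · simp [pvAltGo, hs, List.findIdx?_cons, pvAltGo_skip, pvAltHead_eq]
    · simp [pvAltGo, hs, List.findIdx?_cons, ihu, pvAltHead_eq]

theorem merge_unown_lines_eq_alt (csv_rows : List (List String)) :
    merge_unown_lines csv_rows = merge_unown_lines_alt csv_rows := by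
  induction csv_rows with
  | nil => rfl
  | cons r t ih =>
    by_cases hu : (pvStripHead r == "Unown") = true
    · -- Unown found at the head: both sides in closed form
      have hf : (r :: t).findIdx? (fun s => pvStripHead s == "Unown") = some 0 := by
        simp [List.findIdx?_cons, hu]
      have hB : merge_unown_lines_alt (r :: t) =
          (List.replicate r.length "").set 0 "Unown family"
            :: (List.replicate r.length "").set 1 "Unown"
            :: t.dropWhile (fun s => !(pvStripHead s != "")) := by
        simp [merge_unown_lines_alt, pvAltGo, hu, pvAltGo_skip, pvAltHead_eq]
      rw [hB]
      unfold merge_unown_lines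
      rw [hf]
      have hd := drop_findIdx? (fun s => pvStripHead s != "") t
      cases ht : t.findIdx? (fun s => pvStripHead s != "") with
      | none =>
        simp only [ht, Option.getD_none] at hd
        simp [ht, pvNewRows, ← hd, List.drop_succ_cons]
      | some j =>
        simp only [ht, Option.getD_some] at hd
        simp [ht, pvNewRows, ← hd, List.drop_succ_cons, Nat.add_comm 1 j]
    · -- head is not the Unown row: both sides are r :: (value on t)
      have hf : (r :: t).findIdx? (fun s => pvStripHead s == "Unown")
          = (t.findIdx? (fun s => pvStripHead s == "Unown")).map (· + 1) := by
        simp [List.findIdx?_cons, hu]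
      rcases hpd : pvAltGo t false false with ⟨o, d⟩
      have hB : merge_unown_lines_alt (r :: t) = (if d then r :: o else r :: t) := by
        simp [merge_unown_lines_alt, pvAltGo, hu, hpd, pvAltHead_eq]
      have hd' : d = (t.findIdx? (fun s => pvStripHead s == "Unown")).isSome := by
        have := pvAltGo_done_iff t
        rw [hpd] at this
        exact this
      cases ht : t.findIdx? (fun s => pvStripHead s == "Unown") with
      | none =>
        have hA : merge_unown_lines (r :: t) = r :: t := by
          unfold merge_unown_lines; rw [hf, ht]; rfl
        rw [hA, hB]
        simp [hd', ht]
      | some b =>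
        have hAcons : merge_unown_lines (r :: t) = r :: merge_unown_lines t := by
          unfold merge_unown_lines
          rw [hf, ht]
          simp only [Option.map_some, List.drop_succ_cons]
          cases hr : (t.drop (b + 1)).findIdx? (fun s => pvStripHead s != "") with
          | none => simp [hr, List.take_succ_cons, List.drop_succ_cons]
          | some j =>
            have hx : b + 1 + 1 + j = (b + 1 + j) + 1 := by omega
            simp [hr, List.take_succ_cons, hx, List.drop_succ_cons]
        have hdt : d = true := by rw [hd', ht]; rfl
        rw [hAcons, hB, hdt, ih]
        simp [merge_unown_lines_alt, hpd, hdt]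

-- ===== VERDICT (by name: the statement is the Claim_ definition above) =====
theorem merge_unown_lines_spec : Claim_equal_merge_unown_lines := by
  intro csv_rows _ _
  exact merge_unown_lines_eq_alt csv_rows
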